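-- pv_equiv track=rewrite | github.com/eggduzao/eggduzao | challenges/stack_overflow/2026_02_challenge15/alien_dictionary.py | alien_order_robust_deterministic
-- ===== SOURCE A (Python) =====
-- from collections import defaultdict, deque
-- from typing import Final, Sequence, DefaultDict
--
-- def alien_order_robust_deterministic(words: list[str] | None) -> list[str] | None:
--     """
--     Derive a valid ordering of symbols given a sorted alien dictionary.
--
--     Returns
--     -------
--     list[str] | None
--         - list[str]: one valid topological ordering of all symbols encountered
--         - None: if the input implies a contradiction (cycle) or invalid prefix rule
--     """
--     if words is None or not words:
--         return []
--
--     # Collect all unique symbols with indegree initialized to 0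
--     in_degree: dict[str, int] = {}
--     for w in words:
--         for ch in w:
--             in_degree.setdefault(ch, 0)
--
--     # Build directed edges from adjacent word pairs
--     adj: DefaultDict[str, set[str]] = defaultdict(set)
--
--     for w1, w2 in zip(words, words[1:]):
--         # Invalid prefix case: longer word before its exact prefix
--         if len(w1) > len(w2) and w1.startswith(w2):
--             return None
--
--         # Find first differing character and add constraint
--         for c1, c2 in zip(w1, w2):
--             if c1 != c2:
--                 if c2 not in adj[c1]:
--                     adj[c1].add(c2)
--                     in_degree[c2] += 1
--                 break
--         # If no break happens, either w1==w2 or one is prefix of the other (valid)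
--
--     # Kahn's algorithm (BFS)
--     q: deque[str] = deque(sorted([ch for ch, deg in in_degree.items() if deg == 0]))
--     # ^-- HERE - Biulds the initial 0-indegree queue
--     order: list[str] = []
--
--     while q:
--         ch = q.popleft()
--         order.append(ch)
--
--         for nb in sorted(adj.get(ch, ())):  # <-- HERE - Make sets ordered
--             in_degree[nb] -= 1
--             if in_degree[nb] == 0:
--                 q.append(nb)
--
--         q = deque(sorted(q))  # <-- here - Sorts for deterministic behavior
--
--     # Cycle detection
--     if len(order) != len(in_degree):
--         return None
--
--     return order
-- ===== SOURCE B (Python) =====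
-- def alien_order_robust_deterministic(words):
--     """Greedy selection: repeatedly emit the smallest symbol with no unprocessed
--     predecessor, driven by a plain constraint set (no indegree map, no queue)."""
--     if not words:
--         return []
--
--     # Extract ordering constraints; reject a longer word preceding its own prefix.
--     edges = set()
--     for i in range(1, len(words)):
--         w1, w2 = words[i - 1], words[i]
--         k = min(len(w1), len(w2))
--         j = 0
--         while j < k and w1[j] == w2[j]:
--             j += 1
--         if j < k:
--             edges.add((w1[j], w2[j]))
--         elif len(w1) > len(w2):
--             return None
--
--     remaining = sorted({c for w in words for c in w})
--     order = []
--     while remaining: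
--         ch = next((c for c in remaining
--                    if not any(p in remaining for (p, d) in edges if d == c)), None)
--         if ch is None:
--             return None
--         remaining.remove(ch)
--         order.append(ch)
--     return order
-- ===== Notes on version B (the rewrite author's own statement) =====
-- stated objective: alternative
-- what changed: A runs Kahn's BFS with adjacency-set/indegree dicts and a deque it re-sorts every iteration; B has no queue, no adjacency dict and no indegree map at all: it extracts a deduplicated constraint set and then greedily emits, among the not-yet-output symbols, the smallest one with no unprocessed predecessor.
import Mathlib
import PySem

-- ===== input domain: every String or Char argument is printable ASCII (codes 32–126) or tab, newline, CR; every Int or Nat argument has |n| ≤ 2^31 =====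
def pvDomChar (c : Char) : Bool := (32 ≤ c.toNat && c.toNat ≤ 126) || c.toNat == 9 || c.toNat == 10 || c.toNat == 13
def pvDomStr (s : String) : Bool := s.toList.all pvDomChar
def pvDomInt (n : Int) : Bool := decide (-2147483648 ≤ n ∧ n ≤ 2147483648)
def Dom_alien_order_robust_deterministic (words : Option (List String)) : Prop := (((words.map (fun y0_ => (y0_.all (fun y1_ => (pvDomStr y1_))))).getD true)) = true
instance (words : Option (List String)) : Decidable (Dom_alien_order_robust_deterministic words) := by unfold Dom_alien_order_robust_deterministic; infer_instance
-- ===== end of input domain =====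

-- B replaces A's Kahn queue (re-sorted every iteration) and its adjacency/indegree
-- dicts by a greedy selection over a constraint set: alternative algorithm, same values.
-- Python's 1-char strings are represented internally as Char and wrapped on output.

-- ===== PORT A =====
-- in_degree.setdefault(ch, 0) over all chars of all words
def pvAInDeg0 (ws : List String) : PySem.Dict Char Int :=
  ws.foldl (fun d w => w.toList.foldl (fun d ch => d.setdefault ch 0) d) PySem.Dict.empty

-- 'for c1, c2 in zip(w1, w2): if c1 != c2: …; break' — first differing pair of the zip
def pvAFirstDiff : List (Char × Char) → Option (Char × Char)
  | [] => none
  | (c1, c2) :: rest => if c1 ≠ c2 then some (c1, c2) else pvAFirstDiff rest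

-- body of the 'for w1, w2 in zip(words, words[1:])' loop; none = early 'return None'
def pvAPairStep (st : PySem.Dict Char (PySem.Set Char) × PySem.Dict Char Int)
    (w1 w2 : List Char) :
    Option (PySem.Dict Char (PySem.Set Char) × PySem.Dict Char Int) :=
  if w2.length < w1.length ∧ PySem.Chars.startswith w1 w2 then none
  else
    match pvAFirstDiff (w1.zip w2) with
    | none => some st
    | some (c1, c2) =>
      -- 'if c2 not in adj[c1]' — the defaultdict access inserts an empty set at c1
      let adj1 := st.1.setdefault c1 PySem.Set.empty
      let s : PySem.Set Char := adj1.getD c1 PySem.Set.empty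
      if c2 ∈ s then some (adj1, st.2)
      else some (adj1.insert c1 (PySem.Set.add s c2), st.2.modify c2 0 (· + 1))

def pvAPairs (st : PySem.Dict Char (PySem.Set Char) × PySem.Dict Char Int) :
    List (List Char × List Char) →
    Option (PySem.Dict Char (PySem.Set Char) × PySem.Dict Char Int)
  | [] => some st
  | (w1, w2) :: rest =>
    match pvAPairStep st w1 w2 with
    | none => none
    | some st' => pvAPairs st' rest

-- 'while q: …' — fuel = number of symbols, enough since each symbol is queued at most once
def pvALoop (adj : PySem.Dict Char (PySem.Set Char)) :
    Nat → List Char → PySem.Dict Char Int → List Char → List Char × PySem.Dict Char Int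
  | 0, _, indeg, order => (order, indeg)
  | _ + 1, [], indeg, order => (order, indeg)
  | fuel + 1, ch :: rest, indeg, order =>
    let nbs := PySem.List.sorted ((adj.getD ch PySem.Set.empty : List Char)) (fun x => x) false
    let st := nbs.foldl
      (fun (st : PySem.Dict Char Int × List Char) nb =>
        let d' := st.1.modify nb 0 (· - 1)
        if d'.getD nb 0 = 0 then (d', st.2 ++ [nb]) else (d', st.2))
      (indeg, rest)
    pvALoop adj fuel (PySem.List.sorted st.2 (fun x => x) false) st.1 (order ++ [ch])

def alien_order_robust_deterministic (words : Option (List String)) : Option (List String) :=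
  match words with
  | none => some []
  | some ws =>
    if ws.isEmpty then some []
    else
      let indeg0 := pvAInDeg0 ws
      match pvAPairs (PySem.Dict.empty, indeg0)
          ((ws.zip (ws.drop 1)).map (fun p => (p.1.toList, p.2.toList))) with
      | none => none
      | some (adj, indeg) =>
        let q0 := PySem.List.sorted
          ((indeg.items.filter (fun p => p.2 == 0)).map (·.1)) (fun x => x) false
        let r := pvALoop adj indeg.size q0 indeg []
        if r.1.length ≠ r.2.size then none
        else some (r.1.map (fun c => String.ofList [c]))

-- ===== PORT B =====
-- the 'while j < k and w1[j] == w2[j]: j += 1' scan: first differing position, if any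
def pvBFirstDiff : List Char → List Char → Option (Char × Char)
  | c1 :: r1, c2 :: r2 => if c1 = c2 then pvBFirstDiff r1 r2 else some (c1, c2)
  | _, _ => none

def pvBEdges : PySem.Set (Char × Char) → List (List Char × List Char) →
    Option (PySem.Set (Char × Char))
  | es, [] => some es
  | es, (w1, w2) :: rest =>
    match pvBFirstDiff w1 w2 with
    | some e => pvBEdges (PySem.Set.add es e) rest
    | none => if w2.length < w1.length then none else pvBEdges es rest

-- 'next((c for c in remaining if not any(p in remaining for (p, d) in edges if d == c)), None)'
def pvBPick (edges : PySem.Set (Char × Char)) (remaining : List Char) : Option Char :=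
  remaining.find? (fun c => !(edges.any (fun pd => pd.2 == c && remaining.contains pd.1)))

def pvBLoop (edges : PySem.Set (Char × Char)) (remaining : List Char) (order : List Char) :
    Option (List Char) :=
  if remaining.isEmpty then some order
  else
    match h : pvBPick edges remaining with
    | none => none
    | some ch => pvBLoop edges (remaining.erase ch) (order ++ [ch])
termination_by remaining.length
decreasing_by
  have hm := List.mem_of_find?_eq_some h
  rw [List.length_erase_of_mem hm]
  exact Nat.sub_lt (List.length_pos_of_mem hm) one_pos

def alien_order_robust_deterministic_alt (words : Option (List String)) : Option (List String) :=
  match words with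
  | none => some []
  | some ws =>
    if ws.isEmpty then some []
    else
      match pvBEdges PySem.Set.empty
          ((ws.zip (ws.drop 1)).map (fun p => (p.1.toList, p.2.toList))) with
      | none => none
      | some edges =>
        let remaining := PySem.List.sorted
          (PySem.Set.ofList (ws.flatMap String.toList)) (fun x => x) false
        (pvBLoop edges remaining []).map (fun order => order.map (fun c => String.ofList [c]))

-- ===== PRECONDITION & SPEC =====
def Spec_alien_order_robust_deterministic (words : Option (List String)) (out : Option (List String)) : Prop := out = alien_order_robust_deterministic_alt words
instance (words : Option (List String)) (out : Option (List String)) : Decidable (Spec_alien_order_robust_deterministic words out) := by unfold Spec_alien_order_robust_deterministic; infer_instance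

-- ===== CLAIM (what is proved, stated in full; the proofs are below) =====
def Claim_equal_alien_order_robust_deterministic : Prop := ∀ (words : Option (List String)), Dom_alien_order_robust_deterministic words → Spec_alien_order_robust_deterministic words (alien_order_robust_deterministic words)


-- ===== LEMMAS AND PROOFS =====

-- the edge/indegree/adjacency correspondence maintained through the pair scan
def pvRel (adj : PySem.Dict Char (PySem.Set Char)) (indeg : PySem.Dict Char Int)
    (E : List (Char × Char)) (syms : List Char) : Prop :=
  (∀ c d, d ∈ (adj.getD c PySem.Set.empty : List Char) ↔ (c, d) ∈ E) ∧
  (∀ c, (adj.getD c PySem.Set.empty : List Char).Nodup) ∧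
  (∀ c, indeg.getD c 0 = (E.countP (fun e => e.2 == c) : Int)) ∧
  E.Nodup ∧ (∀ e ∈ E, e.1 ∈ syms ∧ e.2 ∈ syms) ∧ indeg.keys = syms

-- countP split along a disjoint disjunction of predicates
lemma pvCountP_split {α : Type} (l : List α) (p q r : α → Bool)
    (h1 : ∀ e ∈ l, p e = (q e || r e)) (h2 : ∀ e ∈ l, ¬(q e = true ∧ r e = true)) :
    l.countP p = l.countP q + l.countP r := by
  induction l with
  | nil => simp
  | cons a t ih =>
    have ht := ih (fun e he => h1 e (by simp [he])) (fun e he => h2 e (by simp [he]))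
    have ha := h1 a (by simp)
    have hd := h2 a (by simp)
    simp only [List.countP_cons, ht, ha]
    cases hq : q a <;> cases hr : r a <;> simp_all <;> omega

lemma pvFirstDiff_eq : ∀ w1 w2 : List Char, pvAFirstDiff (w1.zip w2) = pvBFirstDiff w1 w2
  | [], [] => rfl
  | [], _ :: _ => rfl
  | _ :: _, [] => rfl
  | c1 :: r1, c2 :: r2 => by
    simp only [List.zip_cons_cons, pvAFirstDiff, pvBFirstDiff]
    by_cases h : c1 = c2 <;> simp [h, pvFirstDiff_eq r1 r2]

lemma pvBFirstDiff_eq_none_iff : ∀ w1 w2 : List Char,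
    pvBFirstDiff w1 w2 = none ↔ (w1 <+: w2 ∨ w2 <+: w1)
  | [], w2 => by simp [pvBFirstDiff]
  | _ :: _, [] => by simp [pvBFirstDiff]
  | c1 :: r1, c2 :: r2 => by
    simp only [pvBFirstDiff]
    by_cases h : c1 = c2
    · subst h
      simp [pvBFirstDiff_eq_none_iff r1 r2, List.cons_prefix_cons]
    · have hnp : ¬((c1 :: r1 <+: c2 :: r2) ∨ (c2 :: r2 <+: c1 :: r1)) := by
        rintro (hp | hp) <;> rw [List.cons_prefix_cons] at hp
        · exact h hp.1
        · exact h hp.1.symm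
      simp [h, hnp]
      exact fun hh => absurd hh.symm h

lemma pvBFirstDiff_mem : ∀ w1 w2 c1 c2, pvBFirstDiff w1 w2 = some (c1, c2) →
    c1 ∈ w1 ∧ c2 ∈ w2
  | [], [], _, _ => by simp [pvBFirstDiff]
  | [], _ :: _, _, _ => by simp [pvBFirstDiff]
  | _ :: _, [], _, _ => by simp [pvBFirstDiff]
  | a1 :: r1, a2 :: r2, c1, c2 => by
    simp only [pvBFirstDiff]
    by_cases h : a1 = a2
    · intro hh
      have := pvBFirstDiff_mem r1 r2 c1 c2 (by simpa [h] using hh)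
      simp [this.1, this.2]
    · intro hh
      simp [h] at hh
      simp [hh.1, hh.2]

-- A's pair-loop body, phrased by cases on B's first-difference scan
lemma pvPairStep_eq (st : PySem.Dict Char (PySem.Set Char) × PySem.Dict Char Int)
    (w1 w2 : List Char) :
    pvAPairStep st w1 w2 =
      match pvBFirstDiff w1 w2 with
      | none => if w2.length < w1.length then none else some st
      | some (c1, c2) =>
        let adj1 := st.1.setdefault c1 PySem.Set.empty
        let s : PySem.Set Char := adj1.getD c1 PySem.Set.empty
        if c2 ∈ s then some (adj1, st.2)
        else some (adj1.insert c1 (PySem.Set.add s c2), st.2.modify c2 0 (· + 1)) := by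
  unfold pvAPairStep
  rw [pvFirstDiff_eq]
  cases hd : pvBFirstDiff w1 w2 with
  | none =>
    by_cases hl : w2.length < w1.length
    · have hs : PySem.Chars.startswith w1 w2 = true := by
        rcases (pvBFirstDiff_eq_none_iff w1 w2).1 hd with h | h
        · exact absurd h.length_le (by omega)
        · exact (PySem.Chars.startswith_iff w1 w2).2 h
      simp [hl, hs, hd]
    · simp [hl, hd]
  | some e =>
    obtain ⟨c1, c2⟩ := e
    have hns : ¬(w2.length < w1.length ∧ PySem.Chars.startswith w1 w2 = true) := by
      rintro ⟨hl, hs⟩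
      have : pvBFirstDiff w1 w2 = none :=
        (pvBFirstDiff_eq_none_iff w1 w2).2 (Or.inr ((PySem.Chars.startswith_iff w1 w2).1 hs))
      simp [this] at hd
    simp [hns, hd]

-- the pair scans of A and B, run side by side
lemma pvPairs_rel (syms : List Char) :
    ∀ (pairs : List (List Char × List Char)) adj indeg E,
    pvRel adj indeg E syms →
    (∀ p ∈ pairs, (∀ c ∈ p.1, c ∈ syms) ∧ (∀ c ∈ p.2, c ∈ syms)) →
    (pvAPairs (adj, indeg) pairs = none ∧ pvBEdges E pairs = none) ∨
    (∃ adj' indeg' E', pvAPairs (adj, indeg) pairs = some (adj', indeg') ∧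
      pvBEdges E pairs = some E' ∧ pvRel adj' indeg' E' syms)
  | [], adj, indeg, E, hrel, _ => Or.inr ⟨adj, indeg, E, rfl, rfl, hrel⟩
  | (w1, w2) :: rest, adj, indeg, E, hrel, hmem => by
    obtain ⟨hadj, hand, hdeg, hnd, hends, hkeys⟩ := hrel
    have hrest : ∀ p ∈ rest, (∀ c ∈ p.1, c ∈ syms) ∧ (∀ c ∈ p.2, c ∈ syms) :=
      fun p hp => hmem p (by simp [hp])
    simp only [pvAPairs, pvBEdges, pvPairStep_eq]
    cases hd : pvBFirstDiff w1 w2 with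
    | none =>
      by_cases hl : w2.length < w1.length
      · simp [hl]
      · simp only [hl, if_neg, if_false]
        exact pvPairs_rel syms rest adj indeg E ⟨hadj, hand, hdeg, hnd, hends, hkeys⟩ hrest
    | some e =>
      obtain ⟨c1, c2⟩ := e
      have hc1s : c1 ∈ syms := (hmem (w1, w2) (by simp)).1 c1 (pvBFirstDiff_mem w1 w2 c1 c2 hd).1
      have hc2s : c2 ∈ syms := (hmem (w1, w2) (by simp)).2 c2 (pvBFirstDiff_mem w1 w2 c1 c2 hd).2
      simp only
      by_cases hmem2 : c2 ∈ ((adj.setdefault c1 PySem.Set.empty).getD c1 PySem.Set.empty : List Char)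
      · -- duplicate constraint: both sides keep their state
        have hs1 : ((adj.setdefault c1 PySem.Set.empty).getD c1 PySem.Set.empty : List Char)
            = (adj.getD c1 PySem.Set.empty : List Char) :=
          PySem.Dict.getD_setdefault_self adj c1 _ _
        have hinE : (c1, c2) ∈ E := (hadj c1 c2).1 (hs1 ▸ hmem2)
        have hcont : adj.contains c1 = true := by
          rcases h : adj.contains c1 with _ | _
          · rw [PySem.Dict.getD_of_not_contains adj _ h] at hs1
            rw [hs1] at hmem2
            simp [PySem.Set.empty] at hmem2
          · rfl
        have hset : adj.setdefault c1 PySem.Set.empty = adj :=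
          PySem.Dict.setdefault_of_contains adj _ hcont
        rw [if_pos hmem2, PySem.Set.add_of_mem hinE, hset]
        exact pvPairs_rel syms rest adj indeg E ⟨hadj, hand, hdeg, hnd, hends, hkeys⟩ hrest
      · -- new constraint
        rw [if_neg hmem2]
        have hs1 : ((adj.setdefault c1 PySem.Set.empty).getD c1 PySem.Set.empty : List Char)
            = (adj.getD c1 PySem.Set.empty : List Char) :=
          PySem.Dict.getD_setdefault_self adj c1 _ _
        have hninE : (c1, c2) ∉ E := fun h => hmem2 (hs1 ▸ (hadj c1 c2).2 h)
        have hm2' : c2 ∉ (adj.getD c1 PySem.Set.empty : List Char) := hs1 ▸ hmem2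
        rw [PySem.Set.add_of_not_mem hninE, hs1, PySem.Set.add_of_not_mem hm2']
        set adj1 := adj.setdefault c1 PySem.Set.empty with hadj1
        have hgetD1 : ∀ c, c ≠ c1 →
            (adj1.getD c PySem.Set.empty : List Char) = (adj.getD c PySem.Set.empty : List Char) := by
          intro c hc
          rw [PySem.Dict.getD_eq_get?_getD, PySem.Dict.get?_setdefault_of_ne adj _ hc,
            ← PySem.Dict.getD_eq_get?_getD]
        refine pvPairs_rel syms rest _ _ (E ++ [(c1, c2)]) ⟨?_, ?_, ?_, ?_, ?_, ?_⟩ hrest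
        · intro c d
          rcases eq_or_ne c c1 with h | h
          · subst h
            rw [PySem.Dict.getD_eq_get?_getD, PySem.Dict.get?_insert_self]
            simp only [Option.getD_some, List.mem_append, List.mem_singleton, Prod.mk.injEq,
              true_and]
            exact or_congr (hadj c d) Iff.rfl
          · rw [PySem.Dict.getD_eq_get?_getD, PySem.Dict.get?_insert_of_ne _ _ h,
              ← PySem.Dict.getD_eq_get?_getD, hgetD1 c h]
            have : ((c, d) ∈ E ∨ (c, d) = (c1, c2)) ↔ (c, d) ∈ E := by
              constructor
              · rintro (hh | hh)
                · exact hh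
                · exact absurd (congrArg Prod.fst hh) h
              · exact Or.inl
            simp only [List.mem_append, List.mem_singleton, this]
            exact hadj c d
        · intro c
          rcases eq_or_ne c c1 with h | h
          · subst h
            rw [PySem.Dict.getD_eq_get?_getD, PySem.Dict.get?_insert_self]
            simp only [Option.getD_some]
            refine List.Nodup.append (hand c) (List.nodup_singleton c2) ?_
            intro x hx hx2
            simp at hx2
            exact hm2' (hx2 ▸ hx)
          · rw [PySem.Dict.getD_eq_get?_getD, PySem.Dict.get?_insert_of_ne _ _ h,
              ← PySem.Dict.getD_eq_get?_getD, hgetD1 c h]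
            exact hand c
        · intro c
          rw [PySem.Dict.getD_modify]
          rw [List.countP_append]
          rcases eq_or_ne c c2 with h | h
          · subst h
            rw [if_pos rfl, hdeg c]
            simp
          · rw [if_neg h, hdeg c]
            have : List.countP (fun e => e.2 == c) [(c1, c2)] = 0 := by
              simp [List.countP_cons]
              exact fun hh => h hh.symm
            omega
        · simp only [List.nodup_append, List.nodup_singleton, true_and]
          refine ⟨hnd, ?_⟩
          intro a ha b hb hab
          simp only [List.mem_singleton] at hb
          rw [hab, hb] at ha
          exact hninE ha
        · intro e he
          rcases List.mem_append.1 he with h | h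
          · exact hends e h
          · simp at h
            subst h
            exact ⟨hc1s, hc2s⟩
        · rw [PySem.Dict.keys_modify, PySem.Dict.keys_insert_of_contains]
          · exact hkeys
          · exact (PySem.Dict.contains_iff_mem_keys indeg c2).2 (hkeys ▸ hc2s)

-- characterisation of the decrement fold in A's main loop
lemma pvFoldDec_fst : ∀ (nbs : List Char) (d : PySem.Dict Char Int) (acc : List Char) (c : Char),
    nbs.Nodup →
    ((nbs.foldl
      (fun (st : PySem.Dict Char Int × List Char) nb =>
        let d' := st.1.modify nb 0 (· - 1)
        if d'.getD nb 0 = 0 then (d', st.2 ++ [nb]) else (d', st.2))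
      (d, acc)).1).getD c 0 = d.getD c 0 - (if c ∈ nbs then 1 else 0)
  | [], d, acc, c, _ => by simp
  | nb :: t, d, acc, c, hnd => by
    simp only [List.foldl_cons]
    have hnd' : t.Nodup := hnd.of_cons
    have hnb : nb ∉ t := by simp [List.nodup_cons] at hnd; exact hnd.1
    have step : ∀ acc', ((t.foldl
        (fun (st : PySem.Dict Char Int × List Char) nb =>
          let d' := st.1.modify nb 0 (· - 1)
          if d'.getD nb 0 = 0 then (d', st.2 ++ [nb]) else (d', st.2))
        (d.modify nb 0 (· - 1), acc')).1).getD c 0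
        = (d.modify nb 0 (· - 1)).getD c 0 - (if c ∈ t then 1 else 0) :=
      fun acc' => pvFoldDec_fst t (d.modify nb 0 (· - 1)) acc' c hnd'
    by_cases h : (d.modify nb 0 (· - 1)).getD nb 0 = 0 <;>
      simp only [h, if_pos, if_neg, ite_true, ite_false, step] <;>
      rw [PySem.Dict.getD_modify] <;>
      rcases eq_or_ne c nb with hc | hc <;>
      simp [hc, hnb, List.mem_cons] <;> omega

lemma pvFoldDec_snd : ∀ (nbs : List Char) (d : PySem.Dict Char Int) (acc : List Char),
    nbs.Nodup →
    (nbs.foldl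
      (fun (st : PySem.Dict Char Int × List Char) nb =>
        let d' := st.1.modify nb 0 (· - 1)
        if d'.getD nb 0 = 0 then (d', st.2 ++ [nb]) else (d', st.2))
      (d, acc)).2 = acc ++ nbs.filter (fun nb => d.getD nb 0 == 1)
  | [], d, acc, _ => by simp
  | nb :: t, d, acc, hnd => by
    simp only [List.foldl_cons, List.filter_cons]
    have hnd' : t.Nodup := hnd.of_cons
    have hnb : nb ∉ t := by simp [List.nodup_cons] at hnd; exact hnd.1
    have hfc : t.filter (fun x => (d.modify nb 0 (· - 1)).getD x 0 == 1)
        = t.filter (fun x => d.getD x 0 == 1) := by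
      refine List.filter_congr ?_
      intro x hx
      rw [PySem.Dict.getD_modify, if_neg]
      intro hh
      exact hnb (hh ▸ hx)
    have htest : (d.modify nb 0 (· - 1)).getD nb 0 = d.getD nb 0 - 1 := by
      rw [PySem.Dict.getD_modify, if_pos rfl]
    by_cases h : (d.modify nb 0 (· - 1)).getD nb 0 = 0
    · have : (d.getD nb 0 == 1) = true := by
        rw [htest] at h
        simp
        omega
      simp only [h, if_pos, ite_true, this, pvFoldDec_snd t _ _ hnd', hfc]
      simp
    · have : (d.getD nb 0 == 1) = false := by
        rw [htest] at h
        simp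
        omega
      simp only [h, if_neg, ite_false, this, pvFoldDec_snd t _ _ hnd', hfc]
      simp

lemma pvFoldDec_keys : ∀ (nbs : List Char) (d : PySem.Dict Char Int) (acc : List Char),
    (∀ nb ∈ nbs, nb ∈ d.keys) →
    (nbs.foldl
      (fun (st : PySem.Dict Char Int × List Char) nb =>
        let d' := st.1.modify nb 0 (· - 1)
        if d'.getD nb 0 = 0 then (d', st.2 ++ [nb]) else (d', st.2))
      (d, acc)).1.keys = d.keys
  | [], d, acc, _ => rfl
  | nb :: t, d, acc, hmem => by
    simp only [List.foldl_cons]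
    have hk : (d.modify nb 0 (· - 1)).keys = d.keys := by
      rw [PySem.Dict.keys_modify, PySem.Dict.keys_insert_of_contains]
      exact (PySem.Dict.contains_iff_mem_keys d nb).2 (hmem nb (by simp))
    have ht : ∀ nb' ∈ t, nb' ∈ (d.modify nb 0 (· - 1)).keys := by
      intro x hx
      rw [hk]
      exact hmem x (by simp [hx])
    by_cases h : (d.modify nb 0 (· - 1)).getD nb 0 = 0 <;>
      simp only [h, if_pos, if_neg, ite_true, ite_false] <;>
      rw [pvFoldDec_keys t _ _ ht, hk]

-- the main loops, run side by side
lemma pvLoop_rel (adj : PySem.Dict Char (PySem.Set Char)) (E : List (Char × Char))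
    (syms : List Char)
    (hadj : ∀ c d, d ∈ (adj.getD c PySem.Set.empty : List Char) ↔ (c, d) ∈ E)
    (hand : ∀ c, (adj.getD c PySem.Set.empty : List Char).Nodup)
    (hnd : E.Nodup)
    (hE2 : ∀ e ∈ E, e.2 ∈ syms) :
    ∀ (fuel : Nat) (rem : List Char) (indeg : PySem.Dict Char Int) (order : List Char),
    rem.Pairwise (· < ·) →
    (∀ c, indeg.getD c 0 = (E.countP (fun e => rem.contains e.1 && e.2 == c) : Int)) →
    (∀ c, c ∉ rem → E.countP (fun e => rem.contains e.1 && e.2 == c) = 0) →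
    indeg.keys = syms →
    order.length + rem.length = syms.length →
    rem.length ≤ fuel →
    (let r := pvALoop adj fuel (rem.filter (fun c => indeg.getD c 0 == 0)) indeg order
     (if r.1.length ≠ r.2.size then none else some r.1) = pvBLoop E rem order) := by
  intro fuel
  induction fuel with
  | zero =>
    intro rem indeg order hrem hdeg hzero hkeys hlen hfuel
    have hrem0 : rem = [] := List.eq_nil_of_length_eq_zero (Nat.le_zero.1 hfuel)
    subst hrem0
    have hsize : indeg.size = syms.length := by
      have h1 : indeg.size = indeg.keys.length := by simp [PySem.Dict.size, PySem.Dict.keys]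
      rw [h1, hkeys]
    simp only [List.filter_nil, pvALoop]
    rw [pvBLoop]
    simp only [List.isEmpty_nil, if_pos]
    simp at hlen
    simp [hsize, hlen]
  | succ fuel ih =>
    intro rem indeg order hrem hdeg hzero hkeys hlen hfuel
    have hremnd : rem.Nodup := hrem.imp ne_of_lt
    have hsize : indeg.size = syms.length := by
      have h1 : indeg.size = indeg.keys.length := by simp [PySem.Dict.size, PySem.Dict.keys]
      rw [h1, hkeys]
    have hpred : ∀ c, (!(E.any (fun pd => pd.2 == c && rem.contains pd.1)))
        = (indeg.getD c 0 == 0) := by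
      intro c
      have h0 := hdeg c
      rcases hany : E.any (fun pd => pd.2 == c && rem.contains pd.1) with _ | _
      · have hz : E.countP (fun e => rem.contains e.1 && e.2 == c) = 0 := by
          rw [List.countP_eq_zero]
          intro e he hb
          have := List.any_eq_false.1 hany e he
          simp only [Bool.and_eq_true] at hb this
          exact this ⟨hb.2, hb.1⟩
        rw [hz] at h0
        simp [h0]
      · obtain ⟨e, he, hbe⟩ := List.any_eq_true.1 hany
        simp only [Bool.and_eq_true] at hbe
        have hpos : E.countP (fun e => rem.contains e.1 && e.2 == c) ≠ 0 := by
          intro hz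
          exact (List.countP_eq_zero.1 hz) e he (by simp only [hbe.1, hbe.2, Bool.and_self])
        have hne : indeg.getD c 0 ≠ 0 := by
          rw [h0]
          intro hh
          exact hpos (by exact_mod_cast hh)
        simp [hne]
    have hfilt : rem.filter (fun c => !(E.any (fun pd => pd.2 == c && rem.contains pd.1)))
        = rem.filter (fun c => indeg.getD c 0 == 0) := List.filter_congr (fun x _ => hpred x)
    cases hq : rem.filter (fun c => indeg.getD c 0 == 0) with
    | nil =>
      cases rem with
      | nil =>
        simp only [List.filter_nil, pvALoop]
        rw [pvBLoop]
        simp only [List.isEmpty_nil, if_pos]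
        simp at hlen
        simp [hsize, hlen]
      | cons r rs =>
        have hpick : pvBPick E (r :: rs) = none := by
          unfold pvBPick
          rw [← List.head?_filter, hfilt, hq]
          rfl
        have hB : pvBLoop E (r :: rs) order = none := by
          rw [pvBLoop]
          rw [if_neg (by simp)]
          split
          · rfl
          · rename_i ch hch
            rw [hpick] at hch
            cases hch
        rw [hB]
        simp only [hq, pvALoop]
        have : order.length ≠ indeg.size := by
          simp only [List.length_cons] at hlen
          omega
        simp [this]
    | cons ch qrest =>
      have hchf : ch ∈ rem.filter (fun c => indeg.getD c 0 == 0) := by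
        rw [hq]; exact List.mem_cons_self ..
      have hchrem : ch ∈ rem := List.mem_of_mem_filter hchf
      have hchz : indeg.getD ch 0 = 0 := by
        have := List.of_mem_filter hchf
        simpa using this
      have hcnt0 : E.countP (fun e => rem.contains e.1 && e.2 == ch) = 0 := by
        have := hdeg ch
        rw [hchz] at this
        exact_mod_cast this.symm
      have hqnd : (ch :: qrest).Nodup := hq ▸ hremnd.filter _
      have hchq : ch ∉ qrest := (List.nodup_cons.1 hqnd).1
      have hqrnd : qrest.Nodup := (List.nodup_cons.1 hqnd).2
      -- membership in qrest
      have hqrest_mem : ∀ x, x ∈ qrest ↔ (x ∈ rem ∧ indeg.getD x 0 = 0 ∧ x ≠ ch) := by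
        intro x
        constructor
        · intro hx
          have hxf : x ∈ rem.filter (fun c => indeg.getD c 0 == 0) := by
            rw [hq]; exact List.mem_cons_of_mem _ hx
          refine ⟨List.mem_of_mem_filter hxf, by simpa using List.of_mem_filter hxf, ?_⟩
          intro hh
          exact hchq (hh ▸ hx)
        · rintro ⟨hxr, hxz, hxch⟩
          have : x ∈ rem.filter (fun c => indeg.getD c 0 == 0) :=
            List.mem_filter.2 ⟨hxr, by simpa using hxz⟩
          rw [hq] at this
          rcases List.mem_cons.1 this with hh | hh
          · exact absurd hh hxch
          · exact hh
      -- the sorted successor list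
      have hnbsnd : (PySem.List.sorted (adj.getD ch PySem.Set.empty : List Char)
          (fun x => x) false).Nodup :=
        ((PySem.List.sorted_perm (adj.getD ch PySem.Set.empty : List Char)
          (fun x => x) false).nodup_iff).2 (hand ch)
      have hnbsmem : ∀ c, c ∈ PySem.List.sorted (adj.getD ch PySem.Set.empty : List Char)
          (fun x => x) false ↔ (ch, c) ∈ E :=
        fun c => (PySem.List.mem_sorted _ _ _ c).trans (hadj ch c)
      -- count bookkeeping when ch is removed
      have hsplit : ∀ c, E.countP (fun e => rem.contains e.1 && e.2 == c)
          = E.countP (fun e => (rem.erase ch).contains e.1 && e.2 == c)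
            + (if (ch, c) ∈ E then 1 else 0) := by
        intro c
        rw [pvCountP_split E _ (fun e => (rem.erase ch).contains e.1 && e.2 == c)
              (fun e => e.1 == ch && e.2 == c) ?_ ?_]
        · congr 1
          have hfun : (fun e : Char × Char => e.1 == ch && e.2 == c)
              = (fun e => e == (ch, c)) := by
            funext e
            cases e with
            | mk a b => rfl
          have hcc : E.countP (fun e => e.1 == ch && e.2 == c) = E.count (ch, c) := by
            rw [hfun]
            rfl
          rw [hcc]
          by_cases hm : (ch, c) ∈ E
          · rw [if_pos hm, List.count_eq_one_of_mem hnd hm]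
          · rw [if_neg hm, List.count_eq_zero.2 hm]
        · intro e he
          by_cases h1 : e.1 = ch <;> by_cases h3 : e.1 ∈ rem <;>
            simp [List.contains_eq_mem, h1, h3, hremnd.mem_erase_iff, hchrem]
        · rintro e he ⟨ha, hb⟩
          simp only [Bool.and_eq_true, beq_iff_eq, List.contains_eq_mem,
            decide_eq_true_eq] at ha hb
          exact (hremnd.mem_erase_iff.1 ha.1).1 hb.1
      -- decremented indegrees
      have hfst : ∀ c, ((PySem.List.sorted (adj.getD ch PySem.Set.empty : List Char)
            (fun x => x) false).foldl
          (fun (st : PySem.Dict Char Int × List Char) nb =>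
            let d' := st.1.modify nb 0 (· - 1)
            if d'.getD nb 0 = 0 then (d', st.2 ++ [nb]) else (d', st.2))
          (indeg, qrest)).1.getD c 0
          = indeg.getD c 0 - (if (ch, c) ∈ E then 1 else 0) := by
        intro c
        rw [pvFoldDec_fst _ _ _ _ hnbsnd]
        congr 1
        simp only [hnbsmem c]
      have hdeg' : ∀ c, ((PySem.List.sorted (adj.getD ch PySem.Set.empty : List Char)
            (fun x => x) false).foldl
          (fun (st : PySem.Dict Char Int × List Char) nb =>
            let d' := st.1.modify nb 0 (· - 1)
            if d'.getD nb 0 = 0 then (d', st.2 ++ [nb]) else (d', st.2))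
          (indeg, qrest)).1.getD c 0
          = (E.countP (fun e => (rem.erase ch).contains e.1 && e.2 == c) : Int) := by
        intro c
        rw [hfst c, hdeg c, hsplit c]
        by_cases hce : (ch, c) ∈ E <;> simp [hce]
      have hsnd : ((PySem.List.sorted (adj.getD ch PySem.Set.empty : List Char)
            (fun x => x) false).foldl
          (fun (st : PySem.Dict Char Int × List Char) nb =>
            let d' := st.1.modify nb 0 (· - 1)
            if d'.getD nb 0 = 0 then (d', st.2 ++ [nb]) else (d', st.2))
          (indeg, qrest)).2
          = qrest ++ (PySem.List.sorted (adj.getD ch PySem.Set.empty : List Char)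
              (fun x => x) false).filter (fun nb => indeg.getD nb 0 == 1) :=
        pvFoldDec_snd _ _ _ hnbsnd
      -- B takes exactly the step A takes
      have hremne : rem.isEmpty = false := by
        cases rem with
        | nil => cases hchrem
        | cons a l => rfl
      have hpick : pvBPick E rem = some ch := by
        unfold pvBPick
        rw [← List.head?_filter, hfilt, hq]
        rfl
      have hBstep : pvBLoop E rem order = pvBLoop E (rem.erase ch) (order ++ [ch]) := by
        rw [pvBLoop]
        rw [if_neg (by simp [hremne])]
        split
        · rename_i hch2
          rw [hpick] at hch2
          cases hch2
        · rename_i ch2 hch2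
          rw [hpick] at hch2
          cases hch2
          rfl
      rw [hBstep]
      simp only [hq, pvALoop]
      set F := (PySem.List.sorted (adj.getD ch PySem.Set.empty : List Char)
            (fun x => x) false).foldl
          (fun (st : PySem.Dict Char Int × List Char) nb =>
            let d' := st.1.modify nb 0 (· - 1)
            if d'.getD nb 0 = 0 then (d', st.2 ++ [nb]) else (d', st.2))
          (indeg, qrest) with hF
      have hzmem : ∀ x, ((F.1.getD x 0 == 0) = true)
          ↔ indeg.getD x 0 = (if (ch, x) ∈ E then 1 else 0) := by
        intro x
        rw [beq_iff_eq, hfst x]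
        constructor <;> intro h <;> omega
      have hchE0 : ∀ x, indeg.getD x 0 = 0 → (ch, x) ∉ E := by
        intro x hx hmemE
        have hnz : E.countP (fun e => rem.contains e.1 && e.2 == x) ≠ 0 := by
          intro hz
          exact (List.countP_eq_zero.1 hz) (ch, x) hmemE
            (by simp [List.contains_eq_mem, hchrem])
        rw [hdeg x] at hx
        exact hnz (by exact_mod_cast hx)
      have hrem' : (rem.erase ch).Pairwise (· < ·) :=
        List.Pairwise.sublist List.erase_sublist hrem
      have hrem'nd : (rem.erase ch).Nodup := hrem'.imp ne_of_lt
      have happ_rem : ∀ x, (ch, x) ∈ E → indeg.getD x 0 = 1 → (x ∈ rem ∧ x ≠ ch) := by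
        intro x hmemE hx1
        constructor
        · by_contra hxr
          have hz := hzero x hxr
          rw [hdeg x, hz] at hx1
          norm_num at hx1
        · intro hh
          subst hh
          rw [hchz] at hx1
          norm_num at hx1
      have hperm : ((rem.erase ch).filter (fun c => F.1.getD c 0 == 0)).Perm F.2 := by
        rw [hsnd]
        refine (List.perm_ext_iff_of_nodup (List.Nodup.filter _ hrem'nd) ?_).2 ?_
        · rw [List.nodup_append]
          refine ⟨hqrnd, List.Nodup.filter _ hnbsnd, ?_⟩
          intro a ha b hb hab
          have haz : indeg.getD a 0 = 0 := ((hqrest_mem a).1 ha).2.1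
          have hb1 := List.of_mem_filter hb
          simp only [beq_iff_eq] at hb1
          rw [hab, hb1] at haz
          norm_num at haz
        · intro x
          rw [List.mem_filter, hremnd.mem_erase_iff, List.mem_append, hqrest_mem x,
            List.mem_filter, hnbsmem x]
          constructor
          · rintro ⟨⟨hxch, hxr⟩, hxz⟩
            have hxz' := (hzmem x).1 hxz
            by_cases hce : (ch, x) ∈ E
            · right
              rw [if_pos hce] at hxz'
              exact ⟨hce, by simp [hxz']⟩
            · left
              rw [if_neg hce] at hxz'
              exact ⟨hxr, hxz', hxch⟩
          · rintro (⟨hxr, hxz, hxch⟩ | ⟨hce, hx1⟩)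
            · refine ⟨⟨hxch, hxr⟩, ?_⟩
              rw [hzmem x, if_neg (hchE0 x hxz)]
              exact hxz
            · rw [beq_iff_eq] at hx1
              obtain ⟨hxr, hxch⟩ := happ_rem x hce hx1
              refine ⟨⟨hxch, hxr⟩, ?_⟩
              rw [hzmem x, if_pos hce]
              exact hx1
      have hq' : PySem.List.sorted F.2 (fun x => x) false
          = (rem.erase ch).filter (fun c => F.1.getD c 0 == 0) :=
        PySem.List.sorted_eq_of_perm_of_pairwise_lt _ _ _ hperm (hrem'.filter _)
      have hkeys' : F.1.keys = syms := by
        rw [hF]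
        rw [pvFoldDec_keys]
        · exact hkeys
        · intro nb hnb
          rw [hkeys]
          exact hE2 (ch, nb) ((hnbsmem nb).1 hnb)
      have hzero' : ∀ c, c ∉ rem.erase ch →
          E.countP (fun e => (rem.erase ch).contains e.1 && e.2 == c) = 0 := by
        intro c hc
        have hle : E.countP (fun e => (rem.erase ch).contains e.1 && e.2 == c)
            ≤ E.countP (fun e => rem.contains e.1 && e.2 == c) := by
          rw [hsplit c]
          omega
        by_cases hcc : c = ch
        · subst hcc
          omega
        · have hcr : c ∉ rem := fun hm => hc (hremnd.mem_erase_iff.2 ⟨hcc, hm⟩)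
          have := hzero c hcr
          omega
      have herlen : (rem.erase ch).length = rem.length - 1 := List.length_erase_of_mem hchrem
      have hlenr : 0 < rem.length := List.length_pos_of_mem hchrem
      have hrec := ih (rem.erase ch) F.1 (order ++ [ch]) hrem' (fun c => hdeg' c) hzero' hkeys'
        (by simp only [List.length_append, List.length_cons, List.length_nil, herlen]; omega)
        (by omega)
      rw [hq']
      exact hrec

-- A's initial in_degree dict: keys are the distinct symbols, all values 0
lemma pvAInDeg0_keys_gen : ∀ (ws : List String) (d : PySem.Dict Char Int),
    (ws.foldl (fun d w => w.toList.foldl (fun d ch => d.setdefault ch 0) d) d).keys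
      = PySem.Set.update d.keys (ws.flatMap String.toList)
  | [], d => by simp [PySem.Set.update]
  | w :: rest, d => by
    simp only [List.foldl_cons, List.flatMap_cons, PySem.Set.update_append]
    rw [pvAInDeg0_keys_gen rest]
    congr 1
    clear pvAInDeg0_keys_gen
    induction w.toList generalizing d with
    | nil => simp [PySem.Set.update]
    | cons c t ih =>
      simp only [List.foldl_cons, PySem.Set.update_cons]
      rw [ih]
      congr 1
      rw [PySem.Dict.keys_setdefault]
      rcases h : d.contains c with _ | _
      · have hc : c ∉ d.keys := fun hm => by
          rw [(PySem.Dict.contains_iff_mem_keys d c).2 hm] at h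
          cases h
        rw [PySem.Set.add_of_not_mem hc]
        simp [h]
      · rw [PySem.Set.add_of_mem ((PySem.Dict.contains_iff_mem_keys d c).1 h)]
        simp [h]

lemma pvSetdef0_getD : ∀ (l : List Char) (d : PySem.Dict Char Int),
    (∀ c, d.getD c 0 = 0) →
    ∀ c, (l.foldl (fun d ch => d.setdefault ch 0) d).getD c 0 = 0
  | [], _, h, c => h c
  | x :: t, d, h, c => by
    simp only [List.foldl_cons]
    refine pvSetdef0_getD t _ ?_ c
    intro c'
    rcases eq_or_ne c' x with hh | hh
    · subst hh
      rw [PySem.Dict.getD_setdefault_self]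
      exact h c'
    · rw [PySem.Dict.getD_eq_get?_getD, PySem.Dict.get?_setdefault_of_ne d _ hh,
        ← PySem.Dict.getD_eq_get?_getD]
      exact h c'

lemma pvAInDeg0_getD : ∀ (ws : List String) (d : PySem.Dict Char Int),
    (∀ c, d.getD c 0 = 0) →
    ∀ c, (ws.foldl (fun d w => w.toList.foldl (fun d ch => d.setdefault ch 0) d) d).getD c 0 = 0
  | [], _, h, c => h c
  | w :: rest, d, h, c =>
    pvAInDeg0_getD rest _ (pvSetdef0_getD w.toList d h) c

-- A's initial queue is the zero-indegree filter of the sorted key list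
lemma pvQ0_eq (d : PySem.Dict Char Int) (hk : d.keys.Nodup) :
    PySem.List.sorted ((d.items.filter (fun p => p.2 == 0)).map (·.1)) (fun x => x) false
      = (PySem.List.sorted d.keys (fun x => x) false).filter (fun c => d.getD c 0 == 0) := by
  have hnodup : (PySem.List.sorted d.keys (fun x => x) false).Nodup :=
    ((PySem.List.sorted_perm d.keys (fun x => x) false).nodup_iff).2 hk
  have hle := PySem.List.sorted_pairwise d.keys (fun x => x)
  have hsp : (PySem.List.sorted d.keys (fun x => x) false).Pairwise (· < ·) :=
    (hle.and hnodup).imp (fun hab => lt_of_le_of_ne hab.1 hab.2)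
  have hX : (d.items.filter (fun p => p.2 == 0)).map (·.1)
      = d.keys.filter (fun c => d.getD c 0 == 0) := by
    rw [PySem.Dict.items_eq_map_keys d hk 0, List.filter_map, List.map_map]
    simp [Function.comp_def]
  rw [hX]
  refine PySem.List.sorted_eq_of_perm_of_pairwise_lt _ _ _ ?_ (hsp.filter _)
  exact ((PySem.List.sorted_perm d.keys (fun x => x) false).filter _)


lemma pvMapIf {α β : Type} (P : Prop) [Decidable P] (x : List α) (f : α → β) :
    (if P then none else some (x.map f))
      = Option.map (List.map f) (if P then none else some x) := by
  split <;> rfl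

-- ===== VERDICT (by name: the statement is the Claim_ definition above) =====
theorem alien_order_robust_deterministic_spec : Claim_equal_alien_order_robust_deterministic := by
  unfold Claim_equal_alien_order_robust_deterministic
  intro words _
  unfold Spec_alien_order_robust_deterministic
  unfold alien_order_robust_deterministic alien_order_robust_deterministic_alt
  cases words with
  | none => rfl
  | some ws =>
    by_cases hempty : ws.isEmpty
    · simp [hempty]
    · simp only [hempty, Bool.false_eq_true, if_false]
      set pairs := (ws.zip (ws.drop 1)).map (fun p => (p.1.toList, p.2.toList)) with hpairs
      set syms : List Char := PySem.Set.ofList (ws.flatMap String.toList) with hsyms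
      have hkeys0 : (pvAInDeg0 ws).keys = syms := by
        unfold pvAInDeg0
        rw [pvAInDeg0_keys_gen ws PySem.Dict.empty, PySem.Dict.keys_empty,
          PySem.Set.update_nil_left]
      have hgetD0 : ∀ c, (pvAInDeg0 ws).getD c 0 = 0 :=
        pvAInDeg0_getD ws PySem.Dict.empty (fun c => PySem.Dict.getD_empty c 0)
      have hrel0 : pvRel PySem.Dict.empty (pvAInDeg0 ws) [] syms := by
        refine ⟨?_, ?_, ?_, List.nodup_nil, ?_, hkeys0⟩
        · intro c d
          simp [PySem.Dict.getD_empty, PySem.Set.empty]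
        · intro c
          simp [PySem.Dict.getD_empty, PySem.Set.empty]
        · intro c
          simp [hgetD0 c]
        · intro e he
          cases he
      have hpmem : ∀ p ∈ pairs, (∀ c ∈ p.1, c ∈ syms) ∧ (∀ c ∈ p.2, c ∈ syms) := by
        intro p hp
        rw [hpairs] at hp
        obtain ⟨q, hq, hpq⟩ := List.mem_map.1 hp
        have hzq := List.of_mem_zip hq
        subst hpq
        constructor
        · intro c hc
          rw [hsyms]
          exact (PySem.Set.mem_ofList _ _).2
            (List.mem_flatMap.2 ⟨q.1, hzq.1, hc⟩)
        · intro c hc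
          rw [hsyms]
          exact (PySem.Set.mem_ofList _ _).2
            (List.mem_flatMap.2 ⟨q.2, List.mem_of_mem_drop hzq.2, hc⟩)
      rcases pvPairs_rel syms pairs PySem.Dict.empty (pvAInDeg0 ws) [] hrel0 hpmem with
        ⟨hA, hB⟩ | ⟨adj, indeg, E, hA, hB, hrel⟩
      · have hB' : pvBEdges PySem.Set.empty pairs = none := hB
        simp [hA, hB, hB']
      · have hB' : pvBEdges PySem.Set.empty pairs = some E := hB
        simp only [hA, hB']
        obtain ⟨hadj, hand, hdegE, hndE, hends, hkeysE⟩ := hrel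
        have hkeysnd : indeg.keys.Nodup := by
          rw [hkeysE, hsyms]
          exact PySem.Set.nodup_ofList _
        have hremp : (PySem.List.sorted (syms : List Char) (fun x => x) false).Pairwise
            (· < ·) := by
          rw [hsyms]
          exact PySem.List.sorted_ofList_pairwise_lt _
        have hmemrem : ∀ c, c ∈ PySem.List.sorted (syms : List Char) (fun x => x) false
            ↔ c ∈ syms := fun c => PySem.List.mem_sorted _ _ _ c
        have hdeg0 : ∀ c, indeg.getD c 0 = (E.countP (fun e =>
            (PySem.List.sorted (syms : List Char) (fun x => x) false).contains e.1
              && e.2 == c) : Int) := by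
          intro c
          rw [hdegE c]
          congr 1
          rw [List.countP_eq_length_filter, List.countP_eq_length_filter,
            List.filter_congr]
          intro e he
          simp [List.contains_eq_mem, (hmemrem e.1).2 (hends e he).1]
        have hzero0 : ∀ c, c ∉ PySem.List.sorted (syms : List Char) (fun x => x) false →
            E.countP (fun e =>
              (PySem.List.sorted (syms : List Char) (fun x => x) false).contains e.1
                && e.2 == c) = 0 := by
          intro c hc
          rw [List.countP_eq_zero]
          intro e he hb
          apply hc
          rw [hmemrem c]
          have h2 : e.2 = c := by
            simp only [Bool.and_eq_true, beq_iff_eq] at hb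
            exact hb.2
          exact h2 ▸ (hends e he).2
        have hsz : indeg.size = syms.length := by
          have h1 : indeg.size = indeg.keys.length := by
            simp [PySem.Dict.size, PySem.Dict.keys]
          rw [h1, hkeysE]
        have hlen0 : ([] : List Char).length
            + (PySem.List.sorted (syms : List Char) (fun x => x) false).length
            = syms.length := by
          simp [PySem.List.length_sorted]
        have hfuel0 : (PySem.List.sorted (syms : List Char) (fun x => x) false).length
            ≤ indeg.size := by
          rw [hsz, PySem.List.length_sorted]
        have hmain := pvLoop_rel adj E syms hadj hand hndE (fun e he => (hends e he).2)
          indeg.size (PySem.List.sorted (syms : List Char) (fun x => x) false) indeg []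
          hremp hdeg0 hzero0 hkeysE hlen0 hfuel0
        have hq0' : PySem.List.sorted
            ((indeg.items.filter (fun p => p.2 == 0)).map (·.1)) (fun x => x) false
            = (PySem.List.sorted (syms : List Char) (fun x => x) false).filter
                (fun c => indeg.getD c 0 == 0) := by
          rw [pvQ0_eq indeg hkeysnd, hkeysE]
        rw [hq0', pvMapIf]
        exact congrArg (Option.map (List.map (fun c => String.ofList [c]))) hmain
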